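-- pv_equiv track=rewrite | github.com/StopSoo/PS | 2025-PS/week-20/[GOLD IV] 별찍기-11.py | make_star
-- ===== SOURCE A (Python) =====
-- def make_star(n):
--   # base-case
--   if n == 3:
--     return ['  *  ', ' * * ', '*****']
--
--   star = make_star(n//2)
--   A = []
--
--   for i in star:
--     A.append(' '*(n//2) + i + ' '*(n//2))
--   for i in star:
--     A.append(i + ' ' + i)
--
--   return A
-- ===== SOURCE B (Python) =====
-- def make_star(n):
--     # bottom-up: collect the halving sizes, then grow the pattern iteratively
--     sizes = []
--     m = n
--     while m != 3:
--         sizes.append(m)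
--         m //= 2
--     star = ['  *  ', ' * * ', '*****']
--     for m in reversed(sizes):
--         pad = ' ' * (m // 2)
--         star = [pad + row + pad for row in star] + [row + ' ' + row for row in star]
--     return star
-- ===== Notes on version B (the rewrite author's own statement) =====
-- stated objective: alternative
-- what changed: Replaces A's top-down recursion by an explicit bottom-up iteration: first collects the stack of sizes by repeated halving, then rebuilds the pattern from the 3-line base with a fold over those sizes in reverse.
import Mathlib
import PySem

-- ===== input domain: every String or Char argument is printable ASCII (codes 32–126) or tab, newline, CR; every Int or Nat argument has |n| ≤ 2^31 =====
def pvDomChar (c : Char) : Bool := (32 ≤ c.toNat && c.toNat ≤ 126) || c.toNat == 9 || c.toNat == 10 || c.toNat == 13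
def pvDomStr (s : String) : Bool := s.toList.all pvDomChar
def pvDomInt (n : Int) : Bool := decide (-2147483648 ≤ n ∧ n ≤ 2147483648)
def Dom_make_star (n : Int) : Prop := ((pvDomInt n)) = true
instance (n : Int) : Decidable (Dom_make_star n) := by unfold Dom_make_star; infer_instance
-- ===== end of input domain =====

-- B rebuilds the Sierpinski pattern bottom-up from the 3-line base by folding over the halving
-- sizes, instead of A's top-down recursion; same output on every input where A terminates.

-- ===== PORT A =====
-- ' ' * n  (Python string repetition; '' for n ≤ 0) — exact, by hand over List Char
def pvPad (n : Int) : String := String.ofList (List.replicate n.toNat ' ')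

-- the recursion of A, with fuel as a totality device only: on every input admitted by
-- Pre_make_star inside Dom the recursion depth is at most 32, so fuel 64 is never exhausted
def make_star_goA (fuel : Nat) (n : Int) : List String :=
  match fuel with
  | 0 => []
  | f + 1 =>
    if n = 3 then ["  *  ", " * * ", "*****"]
    else
      let star := make_star_goA f (PySem.Int.floordiv n 2)
      (star.map fun i => pvPad (PySem.Int.floordiv n 2) ++ i ++ pvPad (PySem.Int.floordiv n 2))
        ++ (star.map fun i => i ++ " " ++ i)

def make_star (n : Int) : List String := make_star_goA 64 n

-- ===== PORT B =====
-- the while loop collecting sizes, fuel again only for totality (bounded by 32 on Dom ∩ Pre_)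
def make_star_sizes (fuel : Nat) (m : Int) : List Int :=
  match fuel with
  | 0 => []
  | f + 1 => if m = 3 then [] else m :: make_star_sizes f (PySem.Int.floordiv m 2)

-- one iteration of B's rebuilding loop body
def make_star_step (star : List String) (m : Int) : List String :=
  (star.map fun row => pvPad (PySem.Int.floordiv m 2) ++ row ++ pvPad (PySem.Int.floordiv m 2))
    ++ (star.map fun row => row ++ " " ++ row)

def make_star_alt (n : Int) : List String :=
  ((make_star_sizes 64 n).reverse).foldl make_star_step ["  *  ", " * * ", "*****"]

-- ===== PRECONDITION & SPEC =====
-- Pre_ admits exactly the n on which Python's A terminates (returns): those whose repeated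
-- floor-halving reaches 3, i.e. 3·2^k ≤ n < 4·2^k for some k; on every other n A recurses
-- forever (RecursionError). The range bound k ≤ log2 n is never restrictive (2^k ≤ n forces
-- k ≤ Nat.log2 n.toNat), it only makes the ∃ decidable and fast to evaluate.
def Pre_make_star (n : Int) : Prop := ∃ k ∈ Finset.range (Nat.log2 n.toNat + 1), 3 * 2 ^ k ≤ n ∧ n < 4 * 2 ^ k
instance (n : Int) : Decidable (Pre_make_star n) := by unfold Pre_make_star; infer_instance
def pvWitness_make_star : Int := (12)

def Spec_make_star (n : Int) (out : List String) : Prop := out = make_star_alt n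
instance (n : Int) (out : List String) : Decidable (Spec_make_star n out) := by unfold Spec_make_star; infer_instance

-- ===== CLAIM (what is proved, stated in full; the proofs are below) =====
def Claim_equal_make_star : Prop := ∀ (n : Int), Dom_make_star n → Pre_make_star n → Spec_make_star n (make_star n)

-- ===== LEMMAS AND PROOFS =====
lemma make_star_main : ∀ (k : Nat) (n : Int) (fa fs : Nat), k < fa → k < fs →
    3 * 2 ^ k ≤ n → n < 4 * 2 ^ k →
    make_star_goA fa n
      = ((make_star_sizes fs n).reverse).foldl make_star_step ["  *  ", " * * ", "*****"] := by
  intro k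
  induction k with
  | zero =>
    intro n fa fs hfa hfs h1 h2
    obtain ⟨a, rfl⟩ := Nat.exists_eq_succ_of_ne_zero (Nat.pos_iff_ne_zero.1 hfa : fa ≠ 0)
    obtain ⟨b, rfl⟩ := Nat.exists_eq_succ_of_ne_zero (Nat.pos_iff_ne_zero.1 hfs : fs ≠ 0)
    norm_num at h1 h2
    have hn : n = 3 := by omega
    subst hn
    simp [make_star_goA, make_star_sizes]
  | succ k ih =>
    intro n fa fs hfa hfs h1 h2
    have hfa0 : fa ≠ 0 := by omega
    have hfs0 : fs ≠ 0 := by omega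
    obtain ⟨a, rfl⟩ := Nat.exists_eq_succ_of_ne_zero hfa0
    obtain ⟨b, rfl⟩ := Nat.exists_eq_succ_of_ne_zero hfs0
    have hP : (1 : Int) ≤ 2 ^ k := one_le_pow₀ (by norm_num)
    have h1' : 6 * 2 ^ k ≤ n := by rw [pow_succ] at h1; linarith
    have h2' : n < 8 * 2 ^ k := by rw [pow_succ] at h2; linarith
    have hne : n ≠ 3 := by nlinarith
    have hmlo : 3 * 2 ^ k ≤ PySem.Int.floordiv n 2 :=
      (PySem.Int.le_floordiv_iff_mul_le (by norm_num)).2 (by linarith)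
    have hmhi : PySem.Int.floordiv n 2 < 4 * 2 ^ k :=
      (PySem.Int.floordiv_lt_iff_lt_mul (by norm_num)).2 (by linarith)
    simp only [make_star_goA, make_star_sizes, if_neg hne, List.reverse_cons,
      List.foldl_append, List.foldl_cons, List.foldl_nil]
    rw [ih (PySem.Int.floordiv n 2) a b (by omega) (by omega) hmlo hmhi]
    rfl

-- ===== VERDICT (by name: the statement is the Claim_ definition above) =====
theorem make_star_spec : Claim_equal_make_star := by
  intro n hdom hpre
  obtain ⟨k, -, h1, h2⟩ := hpre
  have hn : n ≤ 2147483648 := by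
    simp only [Dom_make_star, pvDomInt, decide_eq_true_eq] at hdom
    exact hdom.2
  have hk64 : k < 64 := by
    by_contra h
    have h : 64 ≤ k := by omega
    have h2k : (2 : Int) ^ 64 ≤ 2 ^ k := pow_le_pow_right₀ (by norm_num) h
    have : (3 : Int) * 2 ^ 64 ≤ n := le_trans (by linarith) h1
    norm_num at this
    omega
  exact make_star_main k n 64 64 (by omega) (by omega) h1 h2
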